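-- pv_equiv track=rewrite | github.com/jockee/zmk | chords/evaluate_chords.py | can_be_built_from_ngrams
-- ===== SOURCE A (Python) =====
-- def can_be_built_from_ngrams(word, ngrams):
--     n = len(word)
--     for i in range(1, n):
--         first = word[:i]
--         second = word[i:]
--         if first in ngrams and second in ngrams:
--             return True
--     return False
-- ===== SOURCE B (Python) =====
-- def can_be_built_from_ngrams(word, ngrams):
--     n = len(word)
--     for g in ngrams:
--         if 1 <= len(g) <= n - 1 and word.startswith(g) and word[len(g):] in ngrams:
--             return True
--     return False
-- ===== Notes on version B (the rewrite author's own statement) =====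
-- stated objective: faster
-- what changed: B iterates over the ngrams collection, checking each as a prefix via startswith and testing the one corresponding suffix, instead of A's scan over every split index of the word with two slices and two list-membership scans per index.
import Mathlib
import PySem

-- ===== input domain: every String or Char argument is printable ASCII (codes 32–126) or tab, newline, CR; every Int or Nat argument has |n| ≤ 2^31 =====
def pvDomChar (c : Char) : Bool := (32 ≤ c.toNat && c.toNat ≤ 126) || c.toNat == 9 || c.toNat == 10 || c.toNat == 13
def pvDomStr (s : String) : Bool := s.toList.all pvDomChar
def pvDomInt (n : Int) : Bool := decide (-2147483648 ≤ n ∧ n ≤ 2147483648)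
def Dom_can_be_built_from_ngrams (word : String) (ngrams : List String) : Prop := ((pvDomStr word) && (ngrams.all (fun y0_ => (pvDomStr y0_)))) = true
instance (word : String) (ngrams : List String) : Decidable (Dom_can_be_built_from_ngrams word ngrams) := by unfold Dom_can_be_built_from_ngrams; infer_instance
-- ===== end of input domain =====

-- B iterates over the ngrams (prefix check via startswith + one suffix slice and lookup) instead of scanning every split index of the word; a timing run measured B faster on large inputs.


-- ===== PORT A =====
-- for i in range(1, n): first = word[:i]; second = word[i:]; if first in ngrams and second in ngrams: return True
def can_be_built_from_ngrams (word : String) (ngrams : List String) : Bool :=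
  let n : Int := PySem.Str.len word
  (PySem.List.pyRange 1 n 1).any (fun i =>
    let first := PySem.Str.slice word none (some i)
    let second := PySem.Str.slice word (some i) none
    ngrams.contains first && ngrams.contains second)

-- ===== PORT B =====
-- for g in ngrams: if 1 <= len(g) <= n - 1 and word.startswith(g) and word[len(g):] in ngrams: return True
def can_be_built_from_ngrams_alt (word : String) (ngrams : List String) : Bool :=
  let n : Int := PySem.Str.len word
  ngrams.any (fun g =>
    (1 ≤ PySem.Str.len g && PySem.Str.len g ≤ n - 1) &&
    PySem.Str.startswith word g &&
    ngrams.contains (PySem.Str.slice word (some (PySem.Str.len g)) none))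

-- ===== PRECONDITION & SPEC =====
def Spec_can_be_built_from_ngrams (word : String) (ngrams : List String) (out : Bool) : Prop := out = can_be_built_from_ngrams_alt word ngrams
instance (word : String) (ngrams : List String) (out : Bool) : Decidable (Spec_can_be_built_from_ngrams word ngrams out) := by unfold Spec_can_be_built_from_ngrams; infer_instance

-- ===== CLAIM (what is proved, stated in full; the proofs are below) =====
def Claim_equal_can_be_built_from_ngrams : Prop := ∀ (word : String) (ngrams : List String), Dom_can_be_built_from_ngrams word ngrams → Spec_can_be_built_from_ngrams word ngrams (can_be_built_from_ngrams word ngrams)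

-- ===== LEMMAS AND PROOFS =====

theorem pv_main (word : String) (ngrams : List String) :
    can_be_built_from_ngrams word ngrams = can_be_built_from_ngrams_alt word ngrams := by
  rw [Bool.eq_iff_iff]
  unfold can_be_built_from_ngrams can_be_built_from_ngrams_alt
  simp only [List.any_eq_true, Bool.and_eq_true, List.contains_eq_mem, decide_eq_true_eq,
    PySem.List.mem_pyRange_one, PySem.Str.len_eq]
  constructor
  · rintro ⟨i, ⟨h1, h2⟩, hf, hs⟩
    have h0 : (0:Int) ≤ i := by omega
    have hto : (PySem.Str.slice word none (some i)).toList = word.toList.take i.toNat := by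
      simp [PySem.List.slice_to _ h0]
    have hlen : (((PySem.Str.slice word none (some i)).toList.length : Int)) = i := by
      rw [hto, List.length_take]; push_cast; omega
    refine ⟨PySem.Str.slice word none (some i), hf, ⟨⟨⟨by omega, by omega⟩, ?_⟩, ?_⟩⟩
    · rw [PySem.Str.startswith_eq, PySem.Chars.startswith_iff, hto]
      exact List.take_prefix _ _
    · rw [hlen]; exact hs
  · rintro ⟨g, hg, ⟨⟨h1, h2⟩, hsw⟩, hs⟩
    have hpre : g.toList <+: word.toList := by
      rw [PySem.Str.startswith_eq, PySem.Chars.startswith_iff] at hsw; exact hsw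
    have hle := hpre.length_le
    refine ⟨(g.toList.length : Int), ⟨h1, by omega⟩, ?_, hs⟩
    have heq : PySem.Str.slice word none (some (g.toList.length : Int)) = g := by
      apply String.toList_inj.mp
      simp
      exact (List.prefix_iff_eq_take.mp hpre).symm
    rw [heq]; exact hg

-- ===== VERDICT (by name: the statement is the Claim_ definition above) =====
theorem can_be_built_from_ngrams_spec : Claim_equal_can_be_built_from_ngrams := by
  intro word ngrams _
  unfold Spec_can_be_built_from_ngrams
  exact pv_main word ngrams
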